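-- pv_equiv track=rewrite | github.com/xiangxinai/xiangxin-guardrails | backend/services/detection_guardrail_service.py | _get_highest_risk_level
-- ===== SOURCE A (Python) =====
-- from typing import List, Dict, Tuple, Optional, Union, Any
--
-- RISK_LEVEL_MAPPING = {
--     'S2': 'high_risk',   # Sensitive political topics
--     'S3': 'high_risk',   # Damage to national image
--     'S5': 'high_risk',   # Violent crime
--     'S9': 'high_risk',   # Prompt injection
--     'S1': 'medium_risk', # General political topics
--     'S4': 'medium_risk', # Harm to minors
--     'S6': 'medium_risk', # Illegal activities
--     'S7': 'medium_risk', # Pornography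
--     'S8': 'low_risk',    # Discriminatory content
--     'S10': 'low_risk',   # Insults
--     'S11': 'low_risk',   # Privacy violation
--     'S12': 'low_risk',   # Business violations
-- }
--
-- CATEGORY_NAMES = {
--     'S1': 'General Political Topics',
--     'S2': 'Sensitive Political Topics',
--     'S3': 'Damage to National Image',
--     'S4': 'Harm to Minors',
--     'S5': 'Violent Crime',
--     'S6': 'Illegal Activities',
--     'S7': 'Pornography',
--     'S8': 'Discriminatory Content',
--     'S9': 'Prompt Injection',
--     'S10': 'Insults',
--     'S11': 'Privacy Violation',
--     'S12': 'Business Violations',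
-- }
--
-- def _get_highest_risk_level(categories: List[str]) -> str:
--     """Get highest risk level"""
--     if not categories:
--         return "no_risk"
--
--     risk_levels = []
--     for category in categories:
--         for code, name in CATEGORY_NAMES.items():
--             if name == category:
--                 risk_levels.append(RISK_LEVEL_MAPPING[code])
--                 break
--
--     if "high_risk" in risk_levels:
--         return "high_risk"
--     elif "medium_risk" in risk_levels:
--         return "medium_risk"
--     elif "low_risk" in risk_levels:
--         return "low_risk"
--     else:
--         return "no_risk"
-- ===== SOURCE B (Python) =====
-- RISK_LEVEL_MAPPING = {
--     'S2': 'high_risk',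
--     'S3': 'high_risk',
--     'S5': 'high_risk',
--     'S9': 'high_risk',
--     'S1': 'medium_risk',
--     'S4': 'medium_risk',
--     'S6': 'medium_risk',
--     'S7': 'medium_risk',
--     'S8': 'low_risk',
--     'S10': 'low_risk',
--     'S11': 'low_risk',
--     'S12': 'low_risk',
-- }
--
-- CATEGORY_NAMES = {
--     'S1': 'General Political Topics',
--     'S2': 'Sensitive Political Topics',
--     'S3': 'Damage to National Image',
--     'S4': 'Harm to Minors',
--     'S5': 'Violent Crime',
--     'S6': 'Illegal Activities',
--     'S7': 'Pornography',
--     'S8': 'Discriminatory Content',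
--     'S9': 'Prompt Injection',
--     'S10': 'Insults',
--     'S11': 'Privacy Violation',
--     'S12': 'Business Violations',
-- }
--
-- _RANK = {'low_risk': 1, 'medium_risk': 2, 'high_risk': 3}
-- # name -> numeric rank, composed once at module load
-- _NAME_RANK = {name: _RANK[RISK_LEVEL_MAPPING[code]] for code, name in CATEGORY_NAMES.items()}
-- _RANK_STR = ['no_risk', 'low_risk', 'medium_risk', 'high_risk']
--
-- def _get_highest_risk_level(categories):
--     """Get highest risk level"""
--     if not categories:
--         return "no_risk"
--     best = 0
--     for category in categories:
--         r = _NAME_RANK.get(category)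
--         if r is not None and r > best:
--             best = r
--     return _RANK_STR[best]
-- ===== Notes on version B (the rewrite author's own statement) =====
-- stated objective: simpler
-- what changed: Replaces the collect-all-risk-levels list plus three sequential membership rescans with a precomputed name-to-rank dict and a single max-tracking pass, indexing a rank-to-string table at the end.
import Mathlib
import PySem

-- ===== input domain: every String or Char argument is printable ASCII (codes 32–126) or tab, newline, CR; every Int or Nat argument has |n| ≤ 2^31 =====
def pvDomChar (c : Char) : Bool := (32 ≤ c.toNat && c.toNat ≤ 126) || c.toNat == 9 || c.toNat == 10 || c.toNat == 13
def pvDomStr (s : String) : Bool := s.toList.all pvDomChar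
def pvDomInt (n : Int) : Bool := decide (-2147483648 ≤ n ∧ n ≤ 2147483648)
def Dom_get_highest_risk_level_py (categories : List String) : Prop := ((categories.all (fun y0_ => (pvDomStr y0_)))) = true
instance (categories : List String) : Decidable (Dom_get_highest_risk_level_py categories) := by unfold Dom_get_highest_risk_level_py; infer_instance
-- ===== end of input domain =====

-- B replaces A's collect-then-rescan (risk_levels list + three membership checks) by one
-- max-tracking pass over a precomputed name→rank map; objective: simpler.

-- ===== PORT A =====
def pvRiskLevelMapping : List (String × String) :=
  [("S2", "high_risk"), ("S3", "high_risk"), ("S5", "high_risk"), ("S9", "high_risk"),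
   ("S1", "medium_risk"), ("S4", "medium_risk"), ("S6", "medium_risk"), ("S7", "medium_risk"),
   ("S8", "low_risk"), ("S10", "low_risk"), ("S11", "low_risk"), ("S12", "low_risk")]

def pvCategoryNames : List (String × String) :=
  [("S1", "General Political Topics"), ("S2", "Sensitive Political Topics"),
   ("S3", "Damage to National Image"), ("S4", "Harm to Minors"),
   ("S5", "Violent Crime"), ("S6", "Illegal Activities"),
   ("S7", "Pornography"), ("S8", "Discriminatory Content"),
   ("S9", "Prompt Injection"), ("S10", "Insults"),
   ("S11", "Privacy Violation"), ("S12", "Business Violations")]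

-- A's inner 'for code, name in CATEGORY_NAMES.items(): if name == category: … break':
-- first item whose name equals category; RISK_LEVEL_MAPPING[code] looked up on it
-- (the key is always present for items of pvCategoryNames, so getD "" never fires).
def pvALook (category : String) : Option String :=
  (pvCategoryNames.find? (fun p => p.2 == category)).map
    (fun p => ((pvRiskLevelMapping.find? (fun q => q.1 == p.1)).map Prod.snd).getD "")

def get_highest_risk_level_py (categories : List String) : String :=
  if categories = [] then "no_risk"
  else
    let risk_levels := categories.foldl (fun acc category =>
      match pvALook category with
      | some r => acc ++ [r]
      | none => acc) []
    if risk_levels.contains "high_risk" then "high_risk"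
    else if risk_levels.contains "medium_risk" then "medium_risk"
    else if risk_levels.contains "low_risk" then "low_risk"
    else "no_risk"

-- ===== PORT B =====
-- _NAME_RANK: name → rank, composed once from CATEGORY_NAMES and RISK_LEVEL_MAPPING.
def pvNameRank : List (String × Nat) :=
  [("General Political Topics", 2), ("Sensitive Political Topics", 3),
   ("Damage to National Image", 3), ("Harm to Minors", 2),
   ("Violent Crime", 3), ("Illegal Activities", 2),
   ("Pornography", 2), ("Discriminatory Content", 1),
   ("Prompt Injection", 3), ("Insults", 1),
   ("Privacy Violation", 1), ("Business Violations", 1)]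

def pvRankStr : List String := ["no_risk", "low_risk", "medium_risk", "high_risk"]

def pvBRank (category : String) : Option Nat :=
  (pvNameRank.find? (fun p => p.1 == category)).map Prod.snd

def get_highest_risk_level_py_alt (categories : List String) : String :=
  if categories = [] then "no_risk"
  else
    let best := categories.foldl (fun best category =>
      match pvBRank category with
      | some r => if r > best then r else best
      | none => best) 0
    pvRankStr.getD best "no_risk"

-- ===== PRECONDITION & SPEC =====
def Spec_get_highest_risk_level_py (categories : List String) (out : String) : Prop := out = get_highest_risk_level_py_alt categories
instance (categories : List String) (out : String) : Decidable (Spec_get_highest_risk_level_py categories out) := by unfold Spec_get_highest_risk_level_py; infer_instance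

-- ===== CLAIM (what is proved, stated in full; the proofs are below) =====
def Claim_equal_get_highest_risk_level_py : Prop := ∀ (categories : List String), Dom_get_highest_risk_level_py categories → Spec_get_highest_risk_level_py categories (get_highest_risk_level_py categories)

-- ===== LEMMAS AND PROOFS =====

-- rank of a risk-level string
def pvStrRank (s : String) : Nat :=
  if s = "high_risk" then 3 else if s = "medium_risk" then 2 else if s = "low_risk" then 1 else 0

-- recursive max rank of a list of risk-level strings
def pvMr : List String → Nat
  | [] => 0
  | s :: t => max (pvStrRank s) (pvMr t)

-- per-element rank as B sees it
def pvElemRank (c : String) : Nat := (pvBRank c).getD 0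

-- recursive max rank over categories
def pvMr' : List String → Nat
  | [] => 0
  | c :: t => max (pvElemRank c) (pvMr' t)

lemma pvStrRank_le_three (s : String) : pvStrRank s ≤ 3 := by
  unfold pvStrRank; split_ifs <;> omega

lemma pvMr_le_three : ∀ l, pvMr l ≤ 3 := by
  intro l; induction l with
  | nil => simp [pvMr]
  | cons s t ih => simp [pvMr]; exact ⟨pvStrRank_le_three s, ih⟩

lemma pvStrRank_eq_three_iff (s : String) : 3 ≤ pvStrRank s ↔ s = "high_risk" := by
  unfold pvStrRank; split_ifs with h1 h2 h3 <;> simp_all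

lemma pvStrRank_ge_two_iff (s : String) : 2 ≤ pvStrRank s ↔ s = "high_risk" ∨ s = "medium_risk" := by
  unfold pvStrRank; split_ifs with h1 h2 h3 <;> simp_all

lemma pvStrRank_ge_one_iff (s : String) :
    1 ≤ pvStrRank s ↔ s = "high_risk" ∨ s = "medium_risk" ∨ s = "low_risk" := by
  unfold pvStrRank; split_ifs with h1 h2 h3 <;> simp_all

lemma pvMr_ge_three_iff : ∀ l : List String, 3 ≤ pvMr l ↔ "high_risk" ∈ l := by
  intro l; induction l with
  | nil => simp [pvMr]
  | cons s t ih =>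
      simp [pvMr, ih, pvStrRank_eq_three_iff, eq_comm]

lemma pvMr_ge_two_iff : ∀ l : List String, 2 ≤ pvMr l ↔ "high_risk" ∈ l ∨ "medium_risk" ∈ l := by
  intro l; induction l with
  | nil => simp [pvMr]
  | cons s t ih =>
      simp [pvMr, ih, pvStrRank_ge_two_iff, eq_comm]
      tauto

lemma pvMr_ge_one_iff : ∀ l : List String,
    1 ≤ pvMr l ↔ "high_risk" ∈ l ∨ "medium_risk" ∈ l ∨ "low_risk" ∈ l := by
  intro l; induction l with
  | nil => simp [pvMr]
  | cons s t ih =>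
      simp [pvMr, ih, pvStrRank_ge_one_iff, eq_comm]
      tauto

-- A's membership chain equals indexing pvRankStr at the max rank
lemma pvChain_eq_rankOut (l : List String) :
    (if l.contains "high_risk" then "high_risk"
     else if l.contains "medium_risk" then "medium_risk"
     else if l.contains "low_risk" then "low_risk"
     else "no_risk") = pvRankStr.getD (pvMr l) "no_risk" := by
  have hle := pvMr_le_three l
  have h3 := pvMr_ge_three_iff l
  have h2 := pvMr_ge_two_iff l
  have h1 := pvMr_ge_one_iff l
  simp only [List.contains_iff_mem] at *
  split_ifs with hh hm hl
  · have h : pvMr l = 3 := by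
      have := h3.mpr hh; omega
    simp [h, pvRankStr]
  · have h : pvMr l = 2 := by
      have hge : 2 ≤ pvMr l := h2.mpr (Or.inr hm)
      have hlt : ¬ 3 ≤ pvMr l := fun h => hh (h3.mp h)
      omega
    simp [h, pvRankStr]
  · have h : pvMr l = 1 := by
      have hge : 1 ≤ pvMr l := h1.mpr (Or.inr (Or.inr hl))
      have hlt : ¬ 2 ≤ pvMr l := fun h => (h2.mp h).elim hh hm
      omega
    simp [h, pvRankStr]
  · have h : pvMr l = 0 := by
      have hlt : ¬ 1 ≤ pvMr l := fun h => by rcases h1.mp h with h|h|h <;> [exact hh h; exact hm h; exact hl h]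
      omega
    simp [h, pvRankStr]

-- per-element agreement of the two lookups (12-way case split on the name)
lemma pvLook_rank (c : String) :
    ((pvALook c).map pvStrRank).getD 0 = pvElemRank c := by
  unfold pvALook pvElemRank pvBRank pvCategoryNames pvNameRank pvRiskLevelMapping
  simp only [List.find?_cons, List.find?_nil]
  cases hb0 : (("General Political Topics" : String) == c) with
  | true => rfl
  | false =>
    cases hb1 : (("Sensitive Political Topics" : String) == c) with
    | true => rfl
    | false =>
      cases hb2 : (("Damage to National Image" : String) == c) with
      | true => rfl
      | false =>
        cases hb3 : (("Harm to Minors" : String) == c) with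
        | true => rfl
        | false =>
          cases hb4 : (("Violent Crime" : String) == c) with
          | true => rfl
          | false =>
            cases hb5 : (("Illegal Activities" : String) == c) with
            | true => rfl
            | false =>
              cases hb6 : (("Pornography" : String) == c) with
              | true => rfl
              | false =>
                cases hb7 : (("Discriminatory Content" : String) == c) with
                | true => rfl
                | false =>
                  cases hb8 : (("Prompt Injection" : String) == c) with
                  | true => rfl
                  | false =>
                    cases hb9 : (("Insults" : String) == c) with
                    | true => rfl
                    | false =>
                      cases hb10 : (("Privacy Violation" : String) == c) with
                      | true => rfl
                      | false =>
                        cases hb11 : (("Business Violations" : String) == c) with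
                        | true => rfl
                        | false =>
                          rfl

-- A's collected list
def pvCol : List String → List String
  | [] => []
  | c :: t => match pvALook c with
      | some r => r :: pvCol t
      | none => pvCol t

lemma pvAFold_eq_col : ∀ (cats : List String) (acc : List String),
    cats.foldl (fun acc category =>
      match pvALook category with
      | some r => acc ++ [r]
      | none => acc) acc = acc ++ pvCol cats := by
  intro cats; induction cats with
  | nil => intro acc; simp [pvCol]
  | cons c t ih =>
      intro acc
      simp only [List.foldl_cons, pvCol]
      cases pvALook c <;> simp [ih]

lemma pvMr_col_eq : ∀ cats, pvMr (pvCol cats) = pvMr' cats := by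
  intro cats; induction cats with
  | nil => rfl
  | cons c t ih =>
      have hk := pvLook_rank c
      simp only [pvCol, pvMr']
      cases h : pvALook c with
      | none => simp [h] at hk; simp [ih, ← hk]
      | some r => simp [h] at hk; simp [pvMr, ih, hk]

lemma pvBFold_eq : ∀ (cats : List String) (b : Nat),
    cats.foldl (fun best category =>
      match pvBRank category with
      | some r => if r > best then r else best
      | none => best) b = max b (pvMr' cats) := by
  intro cats; induction cats with
  | nil => intro b; simp [pvMr']
  | cons c t ih =>
      intro b
      simp only [List.foldl_cons, pvMr', ih]
      cases h : pvBRank c with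
      | none => simp [pvElemRank, h]
      | some r =>
          have : pvElemRank c = r := by simp [pvElemRank, h]
          rw [this]
          rcases Nat.lt_or_ge b r with hlt | hge
          · simp [hlt]
            omega
          · have : ¬ r > b := by omega
            simp [this]
            omega

-- ===== VERDICT (by name: the statement is the Claim_ definition above) =====
theorem get_highest_risk_level_py_spec : Claim_equal_get_highest_risk_level_py := by
  intro categories _
  unfold Spec_get_highest_risk_level_py get_highest_risk_level_py get_highest_risk_level_py_alt
  by_cases hng : categories = []
  · simp [hng]
  · simp only [if_neg hng]
    rw [pvAFold_eq_col, pvBFold_eq]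
    simp only [List.nil_append, Nat.zero_max]
    rw [← pvMr_col_eq]
    exact pvChain_eq_rankOut (pvCol categories)
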